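-- pv_equiv track=rewrite | github.com/kv-ops/automl-platform | tests/test_connectors.py | _strip_double_quoted_segments
-- ===== SOURCE A (Python) =====
-- def _strip_double_quoted_segments(sql: str) -> str:
--     """Remove content enclosed in double quotes from a SQL string."""
--
--     result_chars = []
--     in_quotes = False
--     i = 0
--
--     while i < len(sql):
--         ch = sql[i]
--         if ch == '"':
--             if in_quotes and i + 1 < len(sql) and sql[i + 1] == '"':
--                 i += 2
--                 continue
--             in_quotes = not in_quotes
--             i += 1
--             continue
--
--         if not in_quotes:
--             result_chars.append(ch)
--
--         i += 1
--
--     return ''.join(result_chars)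
-- ===== SOURCE B (Python) =====
-- def _strip_double_quoted_segments(sql: str) -> str:
--     """Remove content enclosed in double quotes from a SQL string."""
--     out = []
--     pos = 0
--     n = len(sql)
--     while pos < n:
--         q = sql.find('"', pos)
--         if q == -1:
--             out.append(sql[pos:])
--             break
--         out.append(sql[pos:q])
--         # skip the quoted segment (a doubled "" inside it is an escaped quote)
--         j = q + 1
--         while j < n:
--             if sql[j] == '"':
--                 if j + 1 < n and sql[j + 1] == '"':
--                     j += 2
--                     continue
--                 j += 1
--                 break
--             j += 1
--         pos = j
--     return ''.join(out)
-- ===== Notes on version B (the rewrite author's own statement) =====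
-- stated objective: faster
-- what changed: Replaced the per-character boolean state machine with a segment-wise scan: str.find locates each opening quote, the text before it is copied in one slice, and a separate skip loop consumes the quoted region (handling "" escapes); no per-character Python-level loop runs over unquoted text.
import Mathlib
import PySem

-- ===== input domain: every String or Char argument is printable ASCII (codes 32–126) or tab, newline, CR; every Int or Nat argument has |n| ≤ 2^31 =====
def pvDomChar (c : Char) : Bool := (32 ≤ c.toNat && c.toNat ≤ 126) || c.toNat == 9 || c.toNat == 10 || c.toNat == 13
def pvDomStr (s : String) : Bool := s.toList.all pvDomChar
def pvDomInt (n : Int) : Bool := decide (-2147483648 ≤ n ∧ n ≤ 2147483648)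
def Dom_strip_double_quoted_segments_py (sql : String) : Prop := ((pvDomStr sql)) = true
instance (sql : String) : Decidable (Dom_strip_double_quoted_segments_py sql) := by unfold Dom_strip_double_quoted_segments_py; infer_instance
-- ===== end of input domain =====

-- B replaces A's per-character in_quotes state machine by a segment-wise scan
-- (str.find + slice copying up to each quote, then skip the quoted region): same
-- O(n), measurably faster in Python by moving the unquoted copying into C slices.

-- ===== PORT A =====
-- A's while loop over indices, as structural recursion over the character list
-- carrying the same in_quotes flag; sql[i+1] == '"' becomes a match on the tail.
def pvLoopA : List Char → Bool → List Char
  | [], _ => []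
  | c :: rest, inq =>
    if c = '"' then
      match rest with
      | c2 :: rest2 =>
        if inq ∧ c2 = '"' then pvLoopA rest2 true      -- escaped "" inside quotes: i += 2
        else pvLoopA (c2 :: rest2) (!inq)              -- toggle in_quotes
      | [] => pvLoopA [] (!inq)
    else if inq then pvLoopA rest inq                   -- inside quotes: drop ch
    else c :: pvLoopA rest inq                          -- outside quotes: keep ch
termination_by l _ => l.length
decreasing_by all_goals simp

def strip_double_quoted_segments_py (sql : String) : String :=
  String.ofList (pvLoopA sql.toList false)

-- ===== PORT B =====
-- the predicate "is not a double quote", used by B's find-based split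
def pvNotQuote (c : Char) : Bool := c ≠ '"'

-- B's inner while loop: consume a quoted region (after its opening quote) and
-- return the remainder after the closing quote; "" is skipped as an escape.
def pvSkipQ : List Char → List Char
  | [] => []
  | c :: rest =>
    if c = '"' then
      match rest with
      | c2 :: rest2 => if c2 = '"' then pvSkipQ rest2 else rest
      | [] => rest
    else pvSkipQ rest
termination_by l => l.length
decreasing_by all_goals simp

theorem pvSkipQ_length_le : ∀ l : List Char, (pvSkipQ l).length ≤ l.length := by
  intro l
  induction l using pvSkipQ.induct <;> rw [pvSkipQ.eq_def] <;> simp_all <;> omega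

-- B's outer while loop: sql.find('"', pos) splits off the unquoted prefix
-- (takeWhile/dropWhile), then the quoted region is skipped and scanning resumes.
def pvLoopB (l : List Char) : List Char :=
  match h : l.dropWhile pvNotQuote with
  | [] => l                                             -- no quote left: copy the rest
  | _ :: rest => l.takeWhile pvNotQuote ++ pvLoopB (pvSkipQ rest)
termination_by l.length
decreasing_by
  have h1 : (l.dropWhile pvNotQuote).length ≤ l.length := List.length_dropWhile_le _ _
  have h2 := pvSkipQ_length_le rest
  rw [h] at h1
  simp at h1
  omega

def strip_double_quoted_segments_py_alt (sql : String) : String :=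
  String.ofList (pvLoopB sql.toList)

-- ===== PRECONDITION & SPEC =====
def Spec_strip_double_quoted_segments_py (sql : String) (out : String) : Prop := out = strip_double_quoted_segments_py_alt sql
instance (sql : String) (out : String) : Decidable (Spec_strip_double_quoted_segments_py sql out) := by unfold Spec_strip_double_quoted_segments_py; infer_instance

-- ===== CLAIM (what is proved, stated in full; the proofs are below) =====
def Claim_equal_strip_double_quoted_segments_py : Prop := ∀ (sql : String), Dom_strip_double_quoted_segments_py sql → Spec_strip_double_quoted_segments_py sql (strip_double_quoted_segments_py sql)

-- ===== LEMMAS AND PROOFS =====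

-- Unfolding equations for the well-founded pvLoopB.
theorem pvLoopB_no_quote (l : List Char) (h : l.dropWhile pvNotQuote = []) :
    pvLoopB l = l := by
  rw [pvLoopB]
  split
  · rfl
  · rename_i c rest h2; rw [h] at h2; cases h2

theorem pvLoopB_quote (l : List Char) (c : Char) (rest : List Char)
    (h : l.dropWhile pvNotQuote = c :: rest) :
    pvLoopB l = l.takeWhile pvNotQuote ++ pvLoopB (pvSkipQ rest) := by
  rw [pvLoopB]
  split
  · rename_i h2; rw [h] at h2; cases h2
  · rename_i c2 rest2 h2
    rw [h] at h2
    injection h2 with e1 e2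
    subst e2
    rfl

-- One-step unfolding lemmas for the well-founded pvLoopA.
theorem pvLoopA_nil (inq : Bool) : pvLoopA [] inq = [] := by
  rw [pvLoopA.eq_def]

theorem pvLoopA_esc (rest2 : List Char) :
    pvLoopA ('"' :: '"' :: rest2) true = pvLoopA rest2 true := by
  rw [pvLoopA.eq_def]; simp

theorem pvLoopA_open (r : List Char) : pvLoopA ('"' :: r) false = pvLoopA r true := by
  rw [pvLoopA.eq_def]; cases r <;> simp

theorem pvLoopA_close (c2 : Char) (rest2 : List Char) (h : c2 ≠ '"') :
    pvLoopA ('"' :: c2 :: rest2) true = pvLoopA (c2 :: rest2) false := by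
  rw [pvLoopA.eq_def]; simp [h]

theorem pvLoopA_close_nil : pvLoopA ['"'] true = [] := by
  rw [pvLoopA.eq_def]; simp [pvLoopA_nil]

theorem pvLoopA_drop (c : Char) (r : List Char) (h : c ≠ '"') :
    pvLoopA (c :: r) true = pvLoopA r true := by
  rw [pvLoopA.eq_def]; simp [h]

theorem pvLoopA_keep (c : Char) (r : List Char) (h : c ≠ '"') :
    pvLoopA (c :: r) false = c :: pvLoopA r false := by
  rw [pvLoopA.eq_def]; simp [h]

-- In quoted mode, A drops exactly the region B's pvSkipQ consumes.
theorem pvLoopA_true (l : List Char) : pvLoopA l true = pvLoopA (pvSkipQ l) false := by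
  induction l using pvSkipQ.induct <;> rw [pvSkipQ.eq_def] <;>
    simp_all [pvLoopA_nil, pvLoopA_esc, pvLoopA_close, pvLoopA_close_nil, pvLoopA_drop]

theorem pvLoopA_eq_pvLoopB : ∀ (n : ℕ) (l : List Char), l.length ≤ n →
    pvLoopA l false = pvLoopB l := by
  intro n
  induction n with
  | zero =>
    intro l hl
    have : l = [] := List.eq_nil_of_length_eq_zero (Nat.le_zero.mp hl)
    subst this
    rw [pvLoopB_no_quote _ rfl, pvLoopA_nil]
  | succ n ih =>
    intro l hl
    match l with
    | [] => rw [pvLoopB_no_quote _ rfl, pvLoopA_nil]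
    | c :: r =>
      by_cases hc : c = '"'
      · subst hc
        have hr : (pvSkipQ r).length ≤ n := by
          have := pvSkipQ_length_le r
          simp at hl; omega
        have hdw : ('"' :: r).dropWhile pvNotQuote = '"' :: r := by
          simp [List.dropWhile, pvNotQuote]
        rw [pvLoopB_quote _ _ _ hdw]
        have htw : ('"' :: r).takeWhile pvNotQuote = [] := by
          simp [List.takeWhile, pvNotQuote]
        rw [htw, List.nil_append]
        rw [pvLoopA_open r, pvLoopA_true r]
        exact ih _ hr
      · have hr : r.length ≤ n := by simp at hl; omega
        have hA : pvLoopA (c :: r) false = c :: pvLoopA r false := pvLoopA_keep c r hc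
        have hstep : (c :: r).dropWhile pvNotQuote = r.dropWhile pvNotQuote := by
          simp [List.dropWhile, pvNotQuote, hc]
        have htw : (c :: r).takeWhile pvNotQuote = c :: r.takeWhile pvNotQuote := by
          simp [List.takeWhile, pvNotQuote, hc]
        cases hdw : r.dropWhile pvNotQuote with
        | nil =>
          rw [pvLoopB_no_quote _ (hstep.trans hdw), hA, ih r hr, pvLoopB_no_quote _ hdw]
        | cons x rest =>
          rw [pvLoopB_quote _ _ _ (hstep.trans hdw), hA, ih r hr, pvLoopB_quote _ _ _ hdw,
            htw, List.cons_append]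

-- ===== VERDICT (by name: the statement is the Claim_ definition above) =====
theorem strip_double_quoted_segments_py_spec : Claim_equal_strip_double_quoted_segments_py := by
  intro sql _
  unfold Spec_strip_double_quoted_segments_py strip_double_quoted_segments_py strip_double_quoted_segments_py_alt
  exact congrArg String.ofList (pvLoopA_eq_pvLoopB sql.toList.length sql.toList le_rfl)
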